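-- pv_equiv track=rewrite | github.com/cs88-website/sp24 | hw/sol-hw04/hw04.py | music_dict
-- ===== SOURCE A (Python) =====
-- def music_dict(songs_dict):
--     """
--     Returns a dictionary where each key is an artist name and the
--     value is a list of all of the songs by that artist.
--
--     >>> songs = {"Good Days": "SZA", "Karma": "Taylor Swift", "22": "Taylor Swift", "Snooze": "SZA", "vampire": "Olivia Rodrigo"}
--     >>> music_dict(songs)
--     {'SZA': ['Good Days', 'Snooze'], 'Taylor Swift': ['Karma', '22'], 'Olivia Rodrigo': ['vampire']}
--     """
--     artist_songs = {}
--     for song, artist in songs_dict.items():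
--         if artist in artist_songs:
--             artist_songs[artist].append(song)
--         else:
--             artist_songs[artist] = [song]
--     return artist_songs
-- ===== SOURCE B (Python) =====
-- def music_dict(songs_dict):
--     # Alternative decomposition: list the distinct artists in first-appearance
--     # order, then build each artist's song list with one filtering pass.
--     items = list(songs_dict.items())
--     artists = list(dict.fromkeys(artist for _, artist in items))
--     return {artist: [song for song, a in items if a == artist] for artist in artists}
-- ===== Notes on version B (the rewrite author's own statement) =====
-- stated objective: alternative
-- what changed: Instead of one pass that grows per-artist lists inside a dict, B first computes the distinct artists in order of first appearance (dict.fromkeys) and then builds each artist's song list by a separate filtering pass over the items.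
import Mathlib
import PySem

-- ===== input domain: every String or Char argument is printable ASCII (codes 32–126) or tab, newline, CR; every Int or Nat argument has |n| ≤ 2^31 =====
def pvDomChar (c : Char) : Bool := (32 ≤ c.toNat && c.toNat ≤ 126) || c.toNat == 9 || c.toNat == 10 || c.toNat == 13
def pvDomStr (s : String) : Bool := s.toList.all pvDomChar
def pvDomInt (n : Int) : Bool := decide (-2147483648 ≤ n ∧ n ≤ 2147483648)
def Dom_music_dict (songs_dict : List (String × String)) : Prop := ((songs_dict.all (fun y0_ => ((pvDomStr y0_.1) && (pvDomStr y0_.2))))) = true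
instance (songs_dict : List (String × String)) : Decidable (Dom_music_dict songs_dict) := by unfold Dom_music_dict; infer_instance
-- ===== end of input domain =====

-- B groups by artist via distinct-artists list + one filtering pass per artist,
-- instead of A's incremental dict of growing lists (objective: alternative decomposition).


-- ===== PORT A =====
def music_dict (songs_dict : List (String × String)) : List (String × List String) :=
  (songs_dict.foldl (fun d p =>
      if d.contains p.2 then d.insert p.2 (d.getD p.2 [] ++ [p.1])
      else d.insert p.2 [p.1])
    (PySem.Dict.empty : PySem.Dict String (List String))).items

-- ===== PORT B =====
def music_dict_alt (songs_dict : List (String × String)) : List (String × List String) :=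
  let artists := PySem.List.dedup (songs_dict.map Prod.snd)
  artists.map (fun artist =>
    (artist, (songs_dict.filter (fun p => p.2 == artist)).map Prod.fst))

-- ===== PRECONDITION & SPEC =====
def Spec_music_dict (songs_dict : List (String × String)) (out : List (String × List String)) : Prop := out = music_dict_alt songs_dict
instance (songs_dict : List (String × String)) (out : List (String × List String)) : Decidable (Spec_music_dict songs_dict out) := by unfold Spec_music_dict; infer_instance

-- ===== CLAIM (what is proved, stated in full; the proofs are below) =====
def Claim_equal_music_dict : Prop := ∀ (songs_dict : List (String × String)), Dom_music_dict songs_dict → Spec_music_dict songs_dict (music_dict songs_dict)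

-- ===== LEMMAS AND PROOFS =====

-- A's loop body is exactly a modify with default [].
theorem music_dict_step_eq (d : PySem.Dict String (List String)) (p : String × String) :
    (if d.contains p.2 then d.insert p.2 (d.getD p.2 [] ++ [p.1])
     else d.insert p.2 [p.1]) = d.modify p.2 [] (fun l => l ++ [p.1]) := by
  by_cases h : d.contains p.2
  · simp [h, PySem.Dict.modify]
  · simp only [Bool.not_eq_true] at h
    rw [PySem.Dict.modify, PySem.Dict.getD_of_not_contains _ _ h]
    simp [h]

theorem music_dict_spec' (songs_dict : List (String × String)) :
    music_dict songs_dict = music_dict_alt songs_dict := by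
  unfold music_dict music_dict_alt
  simp only [music_dict_step_eq]
  -- rewrite the fold as a fold over the swapped pairs so the library grouping lemmas apply
  have hswap : songs_dict.foldl (fun d p => d.modify p.2 [] (fun l => l ++ [p.1]))
        (PySem.Dict.empty : PySem.Dict String (List String))
      = (songs_dict.map Prod.swap).foldl (fun d q => d.modify q.1 [] (fun l => l ++ [q.2]))
        PySem.Dict.empty := by
    simp only [List.foldl_map]
    rfl
  rw [hswap]
  set d := (songs_dict.map Prod.swap).foldl
      (fun d q => d.modify q.1 [] (fun l => l ++ [q.2])) (PySem.Dict.empty : PySem.Dict String (List String)) with hd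
  have hkeys : d.keys = PySem.List.dedup (songs_dict.map Prod.snd) := by
    rw [hd, PySem.Dict.keys_foldl_modify_key]
    simp [PySem.Set.update_nil_left, List.map_map, Function.comp_def]
  have hnd : d.keys.Nodup := by
    rw [hd]
    exact PySem.Dict.nodup_keys_foldl_modify_key _ _ _ _ _ PySem.Dict.nodup_keys_empty
  have hget : ∀ c, d.getD c [] = (songs_dict.filter (fun p => p.2 == c)).map Prod.fst := by
    intro c
    rw [hd, PySem.Dict.getD_foldl_modify_append]
    simp [List.filter_map, List.map_map, Function.comp_def, Prod.swap]
  rw [PySem.Dict.items_eq_map_keys d hnd [], hkeys]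
  exact List.map_congr_left (fun a _ => by rw [hget a])

-- ===== VERDICT (by name: the statement is the Claim_ definition above) =====
theorem music_dict_spec : Claim_equal_music_dict := by
  intro songs_dict _
  unfold Spec_music_dict
  exact music_dict_spec' songs_dict
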